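-- pv_equiv track=rewrite | github.com/imseongwoo/Algorithm | 코드카타/둘만의 암호.py | solution
-- ===== SOURCE A (Python) =====
-- def solution(s, skip, index):
--     answer = ''
--     alphabet = ['a', 'b', 'c', 'd', 'e', 'f', 'g', 'h', 'i', 'j', 'k', 'l', 'm', 'n', 'o', 'p', 'q', 'r', 's', 't', 'u',
--                 'v', 'w', 'x', 'y', 'z']
--
--     for char in s:
--         start = alphabet.index(char)
--         count = 0
--         while count < index:
--             start = (start + 1) % 26
--             if alphabet[start] not in skip:
--                 count += 1
--
--         answer += alphabet[start]
--
--     return answer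
-- ===== SOURCE B (Python) =====
-- def solution(s, skip, index):
--     # Precompute the allowed-letter cyclic list and a prefix-count table once,
--     # then answer each character by direct modular indexing.
--     if index <= 0:
--         return s
--     letters = 'abcdefghijklmnopqrstuvwxyz'
--     allowed = [c for c in letters if c not in skip]
--     m = len(allowed)
--     kof = []
--     k = 0
--     for c in letters:
--         if c not in skip:
--             k += 1
--         kof.append(k)
--     return ''.join(allowed[(kof[ord(c) - 97] + index - 1) % m] for c in s)
-- ===== Notes on version B (the rewrite author's own statement) =====
-- stated objective: faster
-- what changed: A steps the index counter one alphabet position at a time for every character (O(len(s)*index) letter tests); B precomputes the allowed-letter list and a 26-entry prefix-count table once and answers each character with a single modular index into the allowed list.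
import Mathlib
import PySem

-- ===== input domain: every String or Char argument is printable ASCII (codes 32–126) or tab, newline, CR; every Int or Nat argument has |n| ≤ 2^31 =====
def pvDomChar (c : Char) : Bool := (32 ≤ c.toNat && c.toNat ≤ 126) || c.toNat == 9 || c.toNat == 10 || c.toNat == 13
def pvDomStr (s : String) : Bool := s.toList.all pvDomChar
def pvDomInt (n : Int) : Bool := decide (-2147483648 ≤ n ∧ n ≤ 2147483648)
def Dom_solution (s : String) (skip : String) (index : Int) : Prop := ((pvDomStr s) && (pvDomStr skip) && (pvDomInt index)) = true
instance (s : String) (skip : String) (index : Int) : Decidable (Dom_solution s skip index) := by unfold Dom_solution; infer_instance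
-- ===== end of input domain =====

-- B replaces A's per-character index-step simulation by a precomputed allowed-letter list plus a
-- prefix-count table and one modular lookup per character (objective: faster).

-- ===== PORT A =====
-- the alphabet list literal from A
def abc : List Char :=
  ['a', 'b', 'c', 'd', 'e', 'f', 'g', 'h', 'i', 'j', 'k', 'l', 'm', 'n', 'o', 'p', 'q', 'r', 's', 't', 'u',
   'v', 'w', 'x', 'y', 'z']

-- A's 'while count < index' loop; the fuel only makes the recursion total (under Pre_ it never runs out)
def loopA (sk : List Char) (index : Int) : Nat → Nat → Int → Nat
  | 0, start, _ => start
  | fuel + 1, start, count =>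
    if count < index then
      let start' := (start + 1) % 26
      if sk.contains (abc.getD start' ' ') then
        loopA sk index fuel start' count
      else
        loopA sk index fuel start' (count + 1)
    else start

def solution (s : String) (skip : String) (index : Int) : String :=
  String.ofList (s.toList.foldl (fun answer ch =>
    answer ++ [abc.getD (loopA skip.toList index (26 * index.toNat) (abc.idxOf ch) 0) ' ']) [])

-- ===== PORT B =====
-- allowed = [c for c in letters if c not in skip]
def allowedOf (sk : List Char) : List Char := abc.filter (fun c => !sk.contains c)

-- the loop body building B's prefix-count table kof (running counter k is the second component)
def kofStep (sk : List Char) (acc : List Int × Int) (c : Char) : List Int × Int :=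
  let k := if sk.contains c then acc.2 else acc.2 + 1
  (acc.1 ++ [k], k)

def kofOf (sk : List Char) : List Int := (abc.foldl (kofStep sk) ([], 0)).1

def solution_alt (s : String) (skip : String) (index : Int) : String :=
  if index ≤ 0 then s
  else
    String.ofList (s.toList.map (fun c =>
      (PySem.List.pyGet? (allowedOf skip.toList)
        (PySem.Int.mod
          ((PySem.List.pyGet? (kofOf skip.toList) ((c.toNat : Int) - 97)).getD 0 + index - 1)
          ((allowedOf skip.toList).length : Int))).getD ' '))

-- ===== PRECONDITION & SPEC =====
-- Pre_ excludes inputs where A raises ValueError (a character of s that is not a lowercase letter)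
-- and inputs where A loops forever (index > 0, s nonempty, and all 26 letters occur in skip).
def Pre_solution (s : String) (skip : String) (index : Int) : Prop :=
  (s.toList.all (fun c => abc.contains c) = true) ∧
  (s.toList = [] ∨ index ≤ 0 ∨ (abc.any (fun c => !skip.toList.contains c)) = true)
instance (s : String) (skip : String) (index : Int) : Decidable (Pre_solution s skip index) := by
  unfold Pre_solution; infer_instance

def pvWitness_solution : String × String × Int := ("ab", "c", 3)

def Spec_solution (s : String) (skip : String) (index : Int) (out : String) : Prop := out = solution_alt s skip index
instance (s : String) (skip : String) (index : Int) (out : String) : Decidable (Spec_solution s skip index out) := by unfold Spec_solution; infer_instance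

-- ===== CLAIM (what is proved, stated in full; the proofs are below) =====
def Claim_equal_solution : Prop := ∀ (s : String) (skip : String) (index : Int), Dom_solution s skip index → Pre_solution s skip index → Spec_solution s skip index (solution s skip index)

-- ===== LEMMAS AND PROOFS =====

-- number of allowed letters among the first p+1 letters of the alphabet
def cnt (sk : List Char) (p : Nat) : Nat :=
  ((abc.take (p + 1)).filter (fun c => !sk.contains c)).length

theorem loopA_exit (sk : List Char) (index : Int) (fuel start : Nat) (count : Int)
    (h : ¬ count < index) : loopA sk index fuel start count = start := by
  cases fuel <;> simp [loopA, h]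

theorem loopA_step (sk : List Char) (index : Int) (fuel start : Nat) (count : Int)
    (h : count < index) :
    loopA sk index (fuel + 1) start count =
      if sk.contains (abc.getD ((start + 1) % 26) ' ') then
        loopA sk index fuel ((start + 1) % 26) count
      else
        loopA sk index fuel ((start + 1) % 26) (count + 1) := by
  simp [loopA, h]

-- a run of skipped letters, no wraparound
theorem loopA_run (sk : List Char) (index : Int) (k : Nat) :
    ∀ (start fuel : Nat) (count : Int), count < index → start + k < 26 →
    (∀ r, start < r → r ≤ start + k → sk.contains (abc.getD r ' ') = true) →
    k ≤ fuel →
    loopA sk index fuel start count = loopA sk index (fuel - k) (start + k) count := by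
  induction k with
  | zero => intro start fuel count _ _ _ _; simp
  | succ k ih =>
    intro start fuel count hc hlt hall hfuel
    obtain ⟨f, rfl⟩ : ∃ f, fuel = f + 1 := ⟨fuel - 1, by omega⟩
    rw [loopA_step sk index f start count hc]
    rw [Nat.mod_eq_of_lt (by omega : start + 1 < 26)]
    rw [hall (start + 1) (by omega) (by omega)]
    simp only [if_true]
    rw [ih (start + 1) f count hc (by omega) (fun r h1 h2 => hall r (by omega) (by omega)) (by omega)]
    have e1 : start + 1 + k = start + (k + 1) := by omega
    have e2 : f - k = f + 1 - (k + 1) := by omega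
    rw [e1, e2]

theorem loopA_hit (sk : List Char) (index : Int) (start fuel : Nat) (count : Int)
    (h : count < index) (h26 : start + 1 < 26)
    (hal : sk.contains (abc.getD (start + 1) ' ') = false) (hf : 1 ≤ fuel) :
    loopA sk index fuel start count = loopA sk index (fuel - 1) (start + 1) (count + 1) := by
  obtain ⟨f, rfl⟩ : ∃ f, fuel = f + 1 := ⟨fuel - 1, by omega⟩
  rw [loopA_step sk index f start count h]
  rw [Nat.mod_eq_of_lt h26, hal]
  simp

theorem loopA_wrap (sk : List Char) (index : Int) (fuel : Nat) (count : Int)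
    (h : count < index) (hf : 1 ≤ fuel) :
    loopA sk index fuel 25 count =
      if sk.contains (abc.getD 0 ' ') then loopA sk index (fuel - 1) 0 count
      else loopA sk index (fuel - 1) 0 (count + 1) := by
  obtain ⟨f, rfl⟩ : ∃ f, fuel = f + 1 := ⟨fuel - 1, by omega⟩
  rw [loopA_step sk index f 25 count h]
  norm_num

theorem cnt_succ (sk : List Char) (p : Nat) (hp : p + 1 < 26) :
    cnt sk (p + 1) = cnt sk p + (if sk.contains (abc.getD (p + 1) ' ') then 0 else 1) := by
  have hlen : p + 1 < abc.length := by
    have : abc.length = 26 := rfl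
    omega
  unfold cnt
  rw [List.take_add_one (l := abc) (i := p + 1), List.getElem?_eq_getElem hlen]
  rw [List.getD_eq_getElem abc ' ' hlen]
  rw [List.filter_append, List.length_append]
  by_cases hb : abc[p + 1] ∈ sk
  · simp [hb]
  · simp [hb]

theorem cnt_zero (sk : List Char) :
    cnt sk 0 = (if sk.contains (abc.getD 0 ' ') then 0 else 1) := by
  unfold cnt
  rw [show abc.take 1 = ['a'] from rfl, show abc.getD 0 ' ' = 'a' from rfl]
  by_cases hb : 'a' ∈ sk
  · simp [hb]
  · simp [hb]

theorem cnt_total (sk : List Char) : cnt sk 25 = (allowedOf sk).length := by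
  unfold cnt allowedOf
  rw [show abc.take (25 + 1) = abc from rfl]

theorem cnt_flat (sk : List Char) (a b : Nat) (hab : a ≤ b) : b < 26 →
    (∀ r, a < r → r ≤ b → sk.contains (abc.getD r ' ') = true) →
    cnt sk b = cnt sk a := by
  induction b, hab using Nat.le_induction with
  | base => intro _ _; rfl
  | succ n hn ih =>
    intro hb hnone
    rw [cnt_succ sk n (by omega), hnone (n + 1) (by omega) (le_refl _)]
    simp only [if_true]
    exact ih (by omega) (fun r h1 h2 => hnone r h1 (by omega))

theorem cnt_le (sk : List Char) (a b : Nat) (hab : a ≤ b) : b < 26 →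
    cnt sk a ≤ cnt sk b := by
  induction b, hab using Nat.le_induction with
  | base => intro _; exact le_refl _
  | succ n hn ih =>
    intro hb
    rw [cnt_succ sk n (by omega)]
    have := ih (by omega)
    split <;> omega

theorem take_filter_pos {α : Type} (P : α → Bool) (L : List α) (q : Nat) (h : q < L.length)
    (hP : P L[q] = true) : 1 ≤ ((L.take (q + 1)).filter P).length := by
  rw [List.take_add_one, List.getElem?_eq_getElem h, List.filter_append, List.length_append]
  simp [hP]

-- allowed[cnt q - 1] is the letter at an allowed position q
theorem filter_getElem?_cnt {α : Type} (P : α → Bool) :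
    ∀ (L : List α) (q : Nat) (h : q < L.length), P L[q] = true →
    (L.filter P)[(((L.take (q + 1)).filter P).length) - 1]? = some L[q] := by
  intro L
  induction L with
  | nil => intro q h hP; simp at h
  | cons c cs ih =>
    intro q h hP
    cases q with
    | zero =>
      simp only [List.getElem_cons_zero] at hP ⊢
      rw [show (c :: cs).take 1 = [c] from rfl]
      simp [hP]
    | succ q =>
      have hq : q < cs.length := by simpa using h
      have hPq : P cs[q] = true := by simpa using hP
      have hgetc : (c :: cs)[q + 1] = cs[q] := by simp
      rw [hgetc]
      rw [show (c :: cs).take (q + 1 + 1) = c :: cs.take (q + 1) from rfl]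
      have hn := take_filter_pos P cs q hq hPq
      by_cases hc : P c = true
      · simp only [List.filter_cons_of_pos hc, List.length_cons]
        have e : ((cs.take (q + 1)).filter P).length + 1 - 1 =
            (((cs.take (q + 1)).filter P).length - 1) + 1 := by omega
        rw [e, List.getElem?_cons_succ]
        exact ih q hq hPq
      · simp only [List.filter_cons_of_neg hc]
        exact ih q hq hPq

theorem allowed_getElem (sk : List Char) (q : Nat) (hq : q < 26)
    (hA : sk.contains (abc.getD q ' ') = false) :
    (allowedOf sk)[cnt sk q - 1]? = some (abc.getD q ' ') := by
  have hlen : q < abc.length := by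
    have : abc.length = 26 := rfl
    omega
  rw [List.getD_eq_getElem abc ' ' hlen] at hA ⊢
  have hP : (fun c => !sk.contains c) abc[q] = true := by
    show (!sk.contains abc[q]) = true
    rw [hA, Bool.not_false]
  have := filter_getElem?_cnt (fun c => !sk.contains c) abc q hlen hP
  unfold allowedOf cnt
  exact this

-- kof table
def kofAux (sk : List Char) (k : Int) : List Char → List Int
  | [] => []
  | c :: cs =>
    let k' := if sk.contains c then k else k + 1
    k' :: kofAux sk k' cs

theorem kof_fold (sk : List Char) :
    ∀ (L : List Char) (acc : List Int) (k : Int),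
    (L.foldl (kofStep sk) (acc, k)).1 = acc ++ kofAux sk k L := by
  intro L
  induction L with
  | nil => intro acc k; simp [kofAux]
  | cons c cs ih =>
    intro acc k
    simp only [List.foldl_cons]
    rw [show kofStep sk (acc, k) c =
      (acc ++ [if sk.contains c then k else k + 1], if sk.contains c then k else k + 1) from rfl]
    rw [ih]
    simp [kofAux]

theorem kofAux_get (sk : List Char) :
    ∀ (L : List Char) (k : Int) (q : Nat), q < L.length →
    (kofAux sk k L)[q]? = some (k + (((L.take (q + 1)).filter (fun c => !sk.contains c)).length : Int)) := by
  intro L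
  induction L with
  | nil => intro k q h; simp at h
  | cons c cs ih =>
    intro k q h
    cases q with
    | zero =>
      simp only [kofAux]
      rw [show (c :: cs).take 1 = [c] from rfl]
      by_cases hb : c ∈ sk
      · simp [hb]
      · simp [hb]
    | succ q =>
      have hq : q < cs.length := by simpa using h
      simp only [kofAux, List.getElem?_cons_succ]
      rw [ih (if sk.contains c then k else k + 1) q hq]
      rw [show (c :: cs).take (q + 1 + 1) = c :: cs.take (q + 1) from rfl]
      by_cases hb : c ∈ sk
      · simp [hb]
      · simp only [List.filter_cons]
        simp [hb]
        omega

theorem kof_get (sk : List Char) (q : Nat) (hq : q < 26) :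
    (kofOf sk)[q]? = some ((cnt sk q : Nat) : Int) := by
  unfold kofOf
  rw [kof_fold sk abc [] 0, List.nil_append]
  have hq' : q < abc.length := by
    have : abc.length = 26 := rfl
    omega
  rw [kofAux_get sk abc 0 q hq']
  unfold cnt
  simp

-- alphabet facts for c ∈ abc
theorem ord_idx (c : Char) (hc : c ∈ abc) : (c.toNat : Int) - 97 = ((abc.idxOf c : Nat) : Int) := by
  fin_cases hc <;> decide

theorem idxOf_lt (c : Char) (hc : c ∈ abc) : abc.idxOf c < 26 := by
  fin_cases hc <;> decide

theorem getD_idxOf (c : Char) (hc : c ∈ abc) : abc.getD (abc.idxOf c) ' ' = c := by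
  fin_cases hc <;> decide

-- one count-increment of A's loop
theorem loopA_hop (sk : List Char) (index : Int) (start : Nat) (count : Int)
    (hm : 1 ≤ (allowedOf sk).length) (hs : start < 26) (hc : count < index) :
    ∃ d q, 1 ≤ d ∧ d ≤ 26 ∧ q < 26 ∧ sk.contains (abc.getD q ' ') = false ∧
      cnt sk q = cnt sk start % (allowedOf sk).length + 1 ∧
      ∀ fuel, d ≤ fuel → loopA sk index fuel start count = loopA sk index (fuel - d) q (count + 1) := by
  by_cases hA : ∃ r, start < r ∧ r < 26 ∧ sk.contains (abc.getD r ' ') = false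
  · have hq1 : start < Nat.find hA := (Nat.find_spec hA).1
    have hq2 : Nat.find hA < 26 := (Nat.find_spec hA).2.1
    have hq3 : sk.contains (abc.getD (Nat.find hA) ' ') = false := (Nat.find_spec hA).2.2
    have hmin : ∀ r, start < r → r < Nat.find hA → sk.contains (abc.getD r ' ') = true := by
      intro r h1 h2
      by_cases hb : sk.contains (abc.getD r ' ') = true
      · exact hb
      · have hb' : sk.contains (abc.getD r ' ') = false := by simpa using hb
        exact absurd ⟨h1, by omega, hb'⟩ (Nat.find_min hA h2)
    obtain ⟨q, hq1, hq2, hq3, hmin⟩ :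
        ∃ q, start < q ∧ q < 26 ∧ sk.contains (abc.getD q ' ') = false ∧
          ∀ r, start < r → r < q → sk.contains (abc.getD r ' ') = true :=
      ⟨Nat.find hA, hq1, hq2, hq3, hmin⟩
    have hstep : cnt sk q = cnt sk (q - 1) + 1 := by
      have h := cnt_succ sk (q - 1) (by omega)
      rw [show q - 1 + 1 = q from by omega] at h
      rw [h, hq3]
      simp
    have hflat : cnt sk (q - 1) = cnt sk start :=
      cnt_flat sk start (q - 1) (by omega) (by omega) (fun r h1 h2 => hmin r h1 (by omega))
    have hle : cnt sk q ≤ (allowedOf sk).length := by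
      rw [← cnt_total sk]
      exact cnt_le sk q 25 (by omega) (by omega)
    have hcnt : cnt sk q = cnt sk start % (allowedOf sk).length + 1 := by
      rw [hstep, hflat, Nat.mod_eq_of_lt (by omega)]
    refine ⟨q - start, q, by omega, by omega, hq2, hq3, hcnt, ?_⟩
    intro fuel hf
    rw [loopA_run sk index (q - 1 - start) start fuel count hc (by omega)
      (fun r h1 h2 => hmin r h1 (by omega)) (by omega)]
    rw [show start + (q - 1 - start) = q - 1 from by omega]
    have hhit := loopA_hit sk index (q - 1) (fuel - (q - 1 - start)) count hc
      (by omega) (by rw [show q - 1 + 1 = q from by omega]; exact hq3) (by omega)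
    rw [show q - 1 + 1 = q from by omega] at hhit
    rw [hhit]
    rw [show fuel - (q - 1 - start) - 1 = fuel - (q - start) from by omega]
  · have hA' : ∀ r, start < r → r < 26 → sk.contains (abc.getD r ' ') = true := by
      intro r h1 h2
      by_cases hb : sk.contains (abc.getD r ' ') = true
      · exact hb
      · have hb' : sk.contains (abc.getD r ' ') = false := by simpa using hb
        exact absurd ⟨r, h1, h2, hb'⟩ hA
    have hEx : ∃ p, p < 26 ∧ sk.contains (abc.getD p ' ') = false := by
      have hne : allowedOf sk ≠ [] := by
        intro he
        rw [he] at hm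
        simp at hm
      obtain ⟨c, hcmem⟩ := List.exists_mem_of_ne_nil _ hne
      unfold allowedOf at hcmem
      rw [List.mem_filter] at hcmem
      obtain ⟨hcabc, hcal⟩ := hcmem
      obtain ⟨p, hp, hpe⟩ := List.getElem_of_mem hcabc
      refine ⟨p, by have : abc.length = 26 := rfl; omega, ?_⟩
      rw [List.getD_eq_getElem abc ' ' hp, hpe]
      simpa using hcal
    have hq2 : Nat.find hEx < 26 := (Nat.find_spec hEx).1
    have hq3 : sk.contains (abc.getD (Nat.find hEx) ' ') = false := (Nat.find_spec hEx).2
    have hqmin : ∀ r, r < Nat.find hEx → sk.contains (abc.getD r ' ') = true := by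
      intro r h2
      by_cases hb : sk.contains (abc.getD r ' ') = true
      · exact hb
      · have hb' : sk.contains (abc.getD r ' ') = false := by simpa using hb
        exact absurd ⟨by omega, hb'⟩ (Nat.find_min hEx h2)
    obtain ⟨q, hq2, hq3, hqmin⟩ :
        ∃ q, q < 26 ∧ sk.contains (abc.getD q ' ') = false ∧
          ∀ r, r < q → sk.contains (abc.getD r ' ') = true :=
      ⟨Nat.find hEx, hq2, hq3, hqmin⟩
    have hqle : q ≤ start := by
      by_contra hgt
      have := hA' q (by omega) hq2
      rw [hq3] at this
      exact absurd this (by simp)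
    have hcstart : cnt sk start = (allowedOf sk).length := by
      have h25 : cnt sk 25 = cnt sk start :=
        cnt_flat sk start 25 (by omega) (by omega) (fun r h1 h2 => hA' r h1 (by omega))
      rw [← h25, cnt_total sk]
    have hcq : cnt sk q = 1 := by
      rcases Nat.eq_zero_or_pos q with h0 | hq0
      · rw [h0, cnt_zero]
        rw [h0] at hq3
        rw [hq3]
        simp
      · have hstep := cnt_succ sk (q - 1) (by omega)
        rw [show q - 1 + 1 = q from by omega] at hstep
        rw [hstep, hq3]
        have h0 : cnt sk 0 = 0 := by
          rw [cnt_zero, hqmin 0 (by omega)]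
          simp
        rcases Nat.eq_zero_or_pos (q - 1) with h1 | h1
        · rw [h1, h0]
          simp
        · have : cnt sk (q - 1) = cnt sk 0 :=
            cnt_flat sk 0 (q - 1) (by omega) (by omega) (fun r hr1 hr2 => hqmin r (by omega))
          rw [this, h0]
          simp
    have hcnt : cnt sk q = cnt sk start % (allowedOf sk).length + 1 := by
      rw [hcq, hcstart, Nat.mod_self]
    refine ⟨26 - start + q, q, by omega, by omega, hq2, hq3, hcnt, ?_⟩
    intro fuel hf
    rw [loopA_run sk index (25 - start) start fuel count hc (by omega)
      (fun r h1 h2 => hA' r h1 (by omega)) (by omega)]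
    rw [show start + (25 - start) = 25 from by omega]
    rw [loopA_wrap sk index (fuel - (25 - start)) count hc (by omega)]
    rcases Nat.eq_zero_or_pos q with h0 | hq0
    · subst h0
      rw [hq3]
      simp only [Bool.false_eq_true, if_false]
      rw [show fuel - (25 - start) - 1 = fuel - (26 - start + 0) from by omega]
    · rw [hqmin 0 (by omega)]
      simp only [if_true]
      rw [loopA_run sk index (q - 1) 0 (fuel - (25 - start) - 1) count hc (by omega)
        (fun r h1 h2 => hqmin r (by omega)) (by omega)]
      simp only [Nat.zero_add]
      have hhit := loopA_hit sk index (q - 1) (fuel - (25 - start) - 1 - (q - 1)) count hc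
        (by omega) (by rw [show q - 1 + 1 = q from by omega]; exact hq3) (by omega)
      rw [show q - 1 + 1 = q from by omega] at hhit
      rw [hhit]
      rw [show fuel - (25 - start) - 1 - (q - 1) - 1 = fuel - (26 - start + q) from by omega]

-- n count-increments of A's loop
theorem loopA_main (sk : List Char) (index : Int) :
    ∀ (n : Nat), 1 ≤ n → ∀ (start fuel : Nat) (count : Int), start < 26 →
    1 ≤ (allowedOf sk).length → count + (n : Int) = index → 26 * n ≤ fuel →
    ∃ q, q < 26 ∧ sk.contains (abc.getD q ' ') = false ∧
      cnt sk q = (cnt sk start + n - 1) % (allowedOf sk).length + 1 ∧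
      loopA sk index fuel start count = q := by
  intro n
  induction n with
  | zero => intro h; omega
  | succ n ih =>
    intro _ start fuel count hs hm hcount hfuel
    have hc : count < index := by omega
    obtain ⟨d, q1, hd1, hd26, hq1lt, hq1al, hq1cnt, hstep⟩ := loopA_hop sk index start count hm hs hc
    rw [hstep fuel (by omega)]
    rcases Nat.eq_zero_or_pos n with h0 | hn
    · subst h0
      refine ⟨q1, hq1lt, hq1al, ?_, ?_⟩
      · rw [hq1cnt, show cnt sk start + 1 - 1 = cnt sk start from by omega]
      · exact loopA_exit sk index (fuel - d) q1 (count + 1) (by omega)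
    · obtain ⟨q, hq, hqa, hqc, hrun⟩ := ih hn q1 (fuel - d) (count + 1) hq1lt hm (by omega) (by omega)
      refine ⟨q, hq, hqa, ?_, hrun⟩
      rw [hqc, hq1cnt]
      rw [show cnt sk start % (allowedOf sk).length + 1 + n - 1 =
        cnt sk start % (allowedOf sk).length + n from by omega]
      rw [Nat.mod_add_mod]
      rw [show cnt sk start + n = cnt sk start + (n + 1) - 1 from by omega]

-- per-character agreement
theorem char_eq (sk : List Char) (index : Int) (hm : 1 ≤ (allowedOf sk).length)
    (hi : 1 ≤ index) (c : Char) (hc : c ∈ abc) :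
    abc.getD (loopA sk index (26 * index.toNat) (abc.idxOf c) 0) ' ' =
      (PySem.List.pyGet? (allowedOf sk)
        (PySem.Int.mod ((PySem.List.pyGet? (kofOf sk) ((c.toNat : Int) - 97)).getD 0 + index - 1)
          ((allowedOf sk).length : Int))).getD ' ' := by
  have hp26 := idxOf_lt c hc
  have hn1 : 1 ≤ index.toNat := by omega
  obtain ⟨q, hq, hqa, hqc, hrun⟩ := loopA_main sk index index.toNat hn1 (abc.idxOf c)
    (26 * index.toNat) 0 hp26 hm (by omega) (le_refl _)
  rw [hrun]
  rw [ord_idx c hc]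
  rw [PySem.List.pyGet?_natCast]
  rw [kof_get sk (abc.idxOf c) hp26]
  simp only [Option.getD_some]
  have hm0 : (0 : Int) < ((allowedOf sk).length : Int) := by exact_mod_cast hm
  rw [PySem.Int.mod_eq_emod_of_pos hm0]
  have he : ((cnt sk (abc.idxOf c) : Nat) : Int) + index - 1 =
      ((cnt sk (abc.idxOf c) + index.toNat - 1 : Nat) : Int) := by omega
  rw [he]
  have hcast : (((cnt sk (abc.idxOf c) + index.toNat - 1) % (allowedOf sk).length : Nat) : Int) =
      ((cnt sk (abc.idxOf c) + index.toNat - 1 : Nat) : Int) % ((allowedOf sk).length : Int) := by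
    push_cast
    ring
  rw [← hcast]
  rw [PySem.List.pyGet?_natCast]
  have hidx : (cnt sk (abc.idxOf c) + index.toNat - 1) % (allowedOf sk).length = cnt sk q - 1 := by
    have := hqc
    set j := (cnt sk (abc.idxOf c) + index.toNat - 1) % (allowedOf sk).length with hj
    omega
  rw [hidx]
  rw [allowed_getElem sk q hq hqa]
  simp

-- ===== VERDICT (by name: the statement is the Claim_ definition above) =====
theorem solution_spec : Claim_equal_solution := by
  intro s skip index _ hpre
  unfold Spec_solution solution solution_alt
  obtain ⟨hallB, hcorner⟩ := hpre
  have hall : ∀ c ∈ s.toList, c ∈ abc := by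
    intro c hcs
    have := List.all_eq_true.mp hallB c hcs
    simpa using this
  by_cases hi : index ≤ 0
  · rw [if_pos hi]
    rw [PySem.List.foldl_append_singleton_eq_map
      (fun ch => abc.getD (loopA skip.toList index (26 * index.toNat) (abc.idxOf ch) 0) ' ') s.toList []]
    simp only [List.nil_append]
    have hmap : s.toList.map
        (fun ch => abc.getD (loopA skip.toList index (26 * index.toNat) (abc.idxOf ch) 0) ' ') = s.toList := by
      rw [List.map_congr_left (g := fun c => c) ?_]
      · simp
      · intro c hcs
        rw [loopA_exit _ _ _ _ _ (by omega)]
        exact getD_idxOf c (hall c hcs)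
    rw [hmap, String.ofList_toList]
  · rw [if_neg hi]
    rcases hcorner with hnil | hile | hex
    · rw [hnil]
      rfl
    · exact absurd hile hi
    · have hm : 1 ≤ (allowedOf skip.toList).length := by
        obtain ⟨c, hcabc, hcns⟩ := List.any_eq_true.mp hex
        have hmem : c ∈ allowedOf skip.toList := by
          unfold allowedOf
          rw [List.mem_filter]
          exact ⟨hcabc, hcns⟩
        have := List.length_pos_of_mem hmem
        omega
      rw [PySem.List.foldl_append_singleton_eq_map
        (fun ch => abc.getD (loopA skip.toList index (26 * index.toNat) (abc.idxOf ch) 0) ' ') s.toList []]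
      simp only [List.nil_append]
      congr 1
      apply List.map_congr_left
      intro c hcs
      exact char_eq skip.toList index hm (by omega) c (hall c hcs)
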